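-- pv_equiv track=rewrite | github.com/smurfedGitHubIO/StackLeague | StackLeague/StackLeague Gold Week 2 May 2.py | party
-- ===== SOURCE A (Python) =====
-- def party(first,second,maximum):
--     lst = []
--     i, j, cnt = 0, 0, 0
--     while cnt < maximum:
--         if i < len(first):
--             if first[i] not in lst:
--                 lst.append(first[i])
--                 cnt += 1
--             i += 1
--         if cnt == maximum:
--             break
--         if j < len(second):
--             if second[j] not in lst:
--                 lst.append(second[j])
--                 cnt += 1
--             j += 1
--         if i == len(first) and j == len(second):
--             break
--     return lst
-- ===== SOURCE B (Python) =====
-- def party(first, second, maximum):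
--     # Phase 1: round-robin interleave of the two lists.
--     merged = []
--     xs, ys = first, second
--     while xs or ys:
--         if xs:
--             merged.append(xs[0])
--             xs = xs[1:]
--         if ys:
--             merged.append(ys[0])
--             ys = ys[1:]
--     # Phase 2: single scan deduplicating, stopping at the cap.
--     result = []
--     for x in merged:
--         if len(result) >= maximum:
--             break
--         if x not in result:
--             result.append(x)
--     return result
-- ===== Notes on version B (the rewrite author's own statement) =====
-- stated objective: alternative
-- what changed: Replaces the single twin-pointer loop (which interleaves, dedups and counts all at once with a mid-loop break) by a two-pass decomposition: first build the full round-robin interleaving, then one linear scan that dedups and cuts off at the maximum.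
import Mathlib
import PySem

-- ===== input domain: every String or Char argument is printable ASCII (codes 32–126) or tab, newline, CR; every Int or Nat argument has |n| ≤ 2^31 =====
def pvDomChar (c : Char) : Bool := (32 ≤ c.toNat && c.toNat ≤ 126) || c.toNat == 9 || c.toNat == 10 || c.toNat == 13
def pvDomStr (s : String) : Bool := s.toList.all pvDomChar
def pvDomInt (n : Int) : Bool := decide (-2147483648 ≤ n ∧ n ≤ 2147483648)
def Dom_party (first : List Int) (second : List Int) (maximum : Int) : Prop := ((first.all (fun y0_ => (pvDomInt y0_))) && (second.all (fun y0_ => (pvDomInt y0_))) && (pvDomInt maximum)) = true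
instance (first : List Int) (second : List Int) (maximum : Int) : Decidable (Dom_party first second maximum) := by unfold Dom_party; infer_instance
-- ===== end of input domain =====

-- B replaces A's single twin-pointer interleave-dedup-count loop by a two-pass
-- decomposition (build the round-robin interleaving, then one dedup-with-cutoff scan);
-- alternative structure, similar cost.

-- ===== PORT A =====
-- A's while loop, transliterated with fuel (the loop makes at most
-- first.length + second.length iterations, each advancing i or j or returning).
def partyFuel (first : List Int) (second : List Int) (maximum : Int) :
    Nat → List Int → Nat → Nat → Int → List Int
  | 0, lst, _, _, _ => lst
  | fuel + 1, lst, i, j, cnt =>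
    if cnt < maximum then
      let s1 : List Int × Nat × Int :=
        if h : i < first.length then
          if lst.contains first[i] then (lst, i + 1, cnt)
          else (lst ++ [first[i]], i + 1, cnt + 1)
        else (lst, i, cnt)
      if s1.2.2 = maximum then s1.1
      else
        let s2 : List Int × Nat × Int :=
          if h : j < second.length then
            if s1.1.contains second[j] then (s1.1, j + 1, s1.2.2)
            else (s1.1 ++ [second[j]], j + 1, s1.2.2 + 1)
          else (s1.1, j, s1.2.2)
        if s1.2.1 = first.length ∧ s2.2.1 = second.length then s2.1
        else partyFuel first second maximum fuel s2.1 s1.2.1 s2.2.1 s2.2.2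
    else lst

def party (first : List Int) (second : List Int) (maximum : Int) : List Int :=
  partyFuel first second maximum (first.length + second.length + 1) [] 0 0 0

-- ===== PORT B =====
-- phase 1 of Source B: while xs or ys: pop the head of each nonempty list in turn
def interMerge : List Int → List Int → List Int
  | [], [] => []
  | x :: xs, y :: ys => x :: y :: interMerge xs ys
  | x :: xs, [] => x :: interMerge xs []
  | [], y :: ys => y :: interMerge [] ys

-- phase 2 of Source B: scan, break once the cap is reached, append unseen elements
def scanDedup (maximum : Int) : List Int → List Int → List Int
  | result, [] => result
  | result, x :: rest =>
    if maximum ≤ (result.length : Int) then result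
    else if result.contains x then scanDedup maximum result rest
    else scanDedup maximum (result ++ [x]) rest

def party_alt (first : List Int) (second : List Int) (maximum : Int) : List Int :=
  scanDedup maximum [] (interMerge first second)

-- ===== PRECONDITION & SPEC =====
def Spec_party (first : List Int) (second : List Int) (maximum : Int) (out : List Int) : Prop := out = party_alt first second maximum
instance (first : List Int) (second : List Int) (maximum : Int) (out : List Int) : Decidable (Spec_party first second maximum out) := by unfold Spec_party; infer_instance

-- ===== CLAIM (what is proved, stated in full; the proofs are below) =====
def Claim_equal_party : Prop := ∀ (first : List Int) (second : List Int) (maximum : Int), Dom_party first second maximum → Spec_party first second maximum (party first second maximum)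

-- ===== LEMMAS AND PROOFS =====

lemma interMerge_nil_nil : interMerge [] [] = [] := by simp [interMerge]

lemma interMerge_nil_left : ∀ ys : List Int, interMerge [] ys = ys
  | [] => interMerge_nil_nil
  | _ :: ys => by simp [interMerge, interMerge_nil_left ys]

lemma interMerge_cons_cons (x y : Int) (xs ys : List Int) :
    interMerge (x :: xs) (y :: ys) = x :: y :: interMerge xs ys := by simp [interMerge]

lemma interMerge_cons_nil (x : Int) (xs : List Int) :
    interMerge (x :: xs) [] = x :: interMerge xs [] := by simp [interMerge]

lemma scanDedup_cons (maximum : Int) (result : List Int) (x : Int) (rest : List Int) :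
    scanDedup maximum result (x :: rest) =
      if maximum ≤ (result.length : Int) then result
      else if result.contains x then scanDedup maximum result rest
      else scanDedup maximum (result ++ [x]) rest := rfl

lemma scanDedup_capped (maximum : Int) (result rest : List Int)
    (h : maximum ≤ (result.length : Int)) :
    scanDedup maximum result rest = result := by
  cases rest with
  | nil => rfl
  | cons x rest => rw [scanDedup_cons, if_pos h]

lemma scanDedup_seen {maximum : Int} {result : List Int} {x : Int} (rest : List Int)
    (h1 : ¬ maximum ≤ (result.length : Int)) (h2 : result.contains x = true) :
    scanDedup maximum result (x :: rest) = scanDedup maximum result rest := by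
  rw [scanDedup_cons, if_neg h1, if_pos h2]

lemma scanDedup_new {maximum : Int} {result : List Int} {x : Int} (rest : List Int)
    (h1 : ¬ maximum ≤ (result.length : Int)) (h2 : ¬ result.contains x = true) :
    scanDedup maximum result (x :: rest) = scanDedup maximum (result ++ [x]) rest := by
  rw [scanDedup_cons, if_neg h1, if_neg h2]

-- Main loop invariant: with cnt = |lst| and enough fuel, A's loop from state
-- (lst, i, j) computes B's dedup scan over the interleaving of the two tails.
lemma partyFuel_eq (first second : List Int) (maximum : Int) :
    ∀ fuel lst (i j : Nat),
      i ≤ first.length → j ≤ second.length →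
      (first.length - i) + (second.length - j) < fuel →
      partyFuel first second maximum fuel lst i j (lst.length : Int)
        = scanDedup maximum lst (interMerge (first.drop i) (second.drop j)) := by
  intro fuel
  induction fuel with
  | zero => intro lst i j _ _ h; omega
  | succ fuel ih =>
    intro lst i j hi hj hf
    by_cases hcnt : (lst.length : Int) < maximum
    case neg =>
      -- cap already reached: the loop condition fails, the scan is capped
      have hcap : maximum ≤ (lst.length : Int) := by omega
      simp only [partyFuel, if_neg hcnt]
      rw [scanDedup_capped _ _ _ hcap]
    case pos =>
    have hcap : ¬ maximum ≤ (lst.length : Int) := by omega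
    have hne : ¬ ((lst.length : Int) = maximum) := by omega
    by_cases hi' : i < first.length
    · have hdi : first.drop i = first[i] :: first.drop (i + 1) :=
        List.drop_eq_getElem_cons hi'
      by_cases hmem : lst.contains first[i] = true
      · -- first[i] already collected
        by_cases hj' : j < second.length
        · have hdj : second.drop j = second[j] :: second.drop (j + 1) :=
            List.drop_eq_getElem_cons hj'
          by_cases hmem2 : lst.contains second[j] = true
          · -- second[j] also already collected
            rw [hdi, hdj, interMerge_cons_cons, scanDedup_seen _ hcap hmem,
              scanDedup_seen _ hcap hmem2]
            by_cases hend : i + 1 = first.length ∧ j + 1 = second.length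
            · simp only [partyFuel, if_pos hcnt, dif_pos hi', if_pos hmem, if_neg hne,
                dif_pos hj', if_pos hmem2, if_pos hend]
              have hd1 : first.drop (i + 1) = [] := List.drop_eq_nil_of_le (by omega)
              have hd2 : second.drop (j + 1) = [] := List.drop_eq_nil_of_le (by omega)
              rw [hd1, hd2, interMerge_nil_nil]; rfl
            · simp only [partyFuel, if_pos hcnt, dif_pos hi', if_pos hmem, if_neg hne,
                dif_pos hj', if_pos hmem2, if_neg hend]
              exact ih lst (i + 1) (j + 1) (by omega) (by omega) (by omega)
          · -- second[j] is new
            rw [hdi, hdj, interMerge_cons_cons, scanDedup_seen _ hcap hmem,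
              scanDedup_new _ hcap hmem2]
            by_cases hend : i + 1 = first.length ∧ j + 1 = second.length
            · simp only [partyFuel, if_pos hcnt, dif_pos hi', if_pos hmem, if_neg hne,
                dif_pos hj', if_neg hmem2, if_pos hend]
              have hd1 : first.drop (i + 1) = [] := List.drop_eq_nil_of_le (by omega)
              have hd2 : second.drop (j + 1) = [] := List.drop_eq_nil_of_le (by omega)
              rw [hd1, hd2, interMerge_nil_nil]; rfl
            · simp only [partyFuel, if_pos hcnt, dif_pos hi', if_pos hmem, if_neg hne,
                dif_pos hj', if_neg hmem2, if_neg hend]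
              have ihkey := ih (lst ++ [second[j]]) (i + 1) (j + 1) (by omega) (by omega) (by omega)
              have e : (((lst ++ [second[j]]).length : Nat) : Int) = (lst.length : Int) + 1 := by
                simp
              rw [e] at ihkey
              exact ihkey
        · -- second list is exhausted
          have hdj : second.drop j = [] := List.drop_eq_nil_of_le (by omega)
          rw [hdi, hdj, interMerge_cons_nil, scanDedup_seen _ hcap hmem]
          by_cases hend : i + 1 = first.length ∧ j = second.length
          · simp only [partyFuel, if_pos hcnt, dif_pos hi', if_pos hmem, if_neg hne,
              dif_neg hj', if_pos hend]
            have hd1 : first.drop (i + 1) = [] := List.drop_eq_nil_of_le (by omega)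
            rw [hd1, interMerge_nil_nil]; rfl
          · simp only [partyFuel, if_pos hcnt, dif_pos hi', if_pos hmem, if_neg hne,
              dif_neg hj', if_neg hend]
            have ihkey := ih lst (i + 1) j (by omega) hj (by omega)
            rw [ihkey, hdj]
      · -- first[i] is new: A appends it and may break right away
        by_cases hbrk : (lst.length : Int) + 1 = maximum
        · -- the count reaches the maximum after first[i]: A breaks, B's scan caps
          have hcap2 : maximum ≤ (((lst ++ [first[i]]).length : Nat) : Int) := by
            simp; omega
          by_cases hj' : j < second.length
          · have hdj : second.drop j = second[j] :: second.drop (j + 1) :=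
              List.drop_eq_getElem_cons hj'
            rw [hdi, hdj, interMerge_cons_cons, scanDedup_new _ hcap hmem,
              scanDedup_capped _ _ _ hcap2]
            simp only [partyFuel, if_pos hcnt, dif_pos hi', if_neg hmem, if_pos hbrk]
          · have hdj : second.drop j = [] := List.drop_eq_nil_of_le (by omega)
            rw [hdi, hdj, interMerge_cons_nil, scanDedup_new _ hcap hmem,
              scanDedup_capped _ _ _ hcap2]
            simp only [partyFuel, if_pos hcnt, dif_pos hi', if_neg hmem, if_pos hbrk]
        · -- no break after first[i]
          have hcap1 : ¬ maximum ≤ (((lst ++ [first[i]]).length : Nat) : Int) := by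
            simp; omega
          by_cases hj' : j < second.length
          · have hdj : second.drop j = second[j] :: second.drop (j + 1) :=
              List.drop_eq_getElem_cons hj'
            by_cases hmem2 : (lst ++ [first[i]]).contains second[j] = true
            · rw [hdi, hdj, interMerge_cons_cons, scanDedup_new _ hcap hmem,
                scanDedup_seen _ hcap1 hmem2]
              by_cases hend : i + 1 = first.length ∧ j + 1 = second.length
              · simp only [partyFuel, if_pos hcnt, dif_pos hi', if_neg hmem, if_neg hbrk,
                  dif_pos hj', if_pos hmem2, if_pos hend]
                have hd1 : first.drop (i + 1) = [] := List.drop_eq_nil_of_le (by omega)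
                have hd2 : second.drop (j + 1) = [] := List.drop_eq_nil_of_le (by omega)
                rw [hd1, hd2, interMerge_nil_nil]; rfl
              · simp only [partyFuel, if_pos hcnt, dif_pos hi', if_neg hmem, if_neg hbrk,
                  dif_pos hj', if_pos hmem2, if_neg hend]
                have ihkey := ih (lst ++ [first[i]]) (i + 1) (j + 1) (by omega) (by omega) (by omega)
                have e : (((lst ++ [first[i]]).length : Nat) : Int) = (lst.length : Int) + 1 := by
                  simp
                rw [e] at ihkey
                exact ihkey
            · rw [hdi, hdj, interMerge_cons_cons, scanDedup_new _ hcap hmem,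
                scanDedup_new _ hcap1 hmem2]
              by_cases hend : i + 1 = first.length ∧ j + 1 = second.length
              · simp only [partyFuel, if_pos hcnt, dif_pos hi', if_neg hmem, if_neg hbrk,
                  dif_pos hj', if_neg hmem2, if_pos hend]
                have hd1 : first.drop (i + 1) = [] := List.drop_eq_nil_of_le (by omega)
                have hd2 : second.drop (j + 1) = [] := List.drop_eq_nil_of_le (by omega)
                rw [hd1, hd2, interMerge_nil_nil]; rfl
              · simp only [partyFuel, if_pos hcnt, dif_pos hi', if_neg hmem, if_neg hbrk,
                  dif_pos hj', if_neg hmem2, if_neg hend]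
                have ihkey := ih (lst ++ [first[i]] ++ [second[j]]) (i + 1) (j + 1)
                  (by omega) (by omega) (by omega)
                have e : (((lst ++ [first[i]] ++ [second[j]]).length : Nat) : Int)
                    = (lst.length : Int) + 1 + 1 := by simp; omega
                rw [e] at ihkey
                exact ihkey
          · have hdj : second.drop j = [] := List.drop_eq_nil_of_le (by omega)
            rw [hdi, hdj, interMerge_cons_nil, scanDedup_new _ hcap hmem]
            by_cases hend : i + 1 = first.length ∧ j = second.length
            · simp only [partyFuel, if_pos hcnt, dif_pos hi', if_neg hmem, if_neg hbrk,
                dif_neg hj', if_pos hend]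
              have hd1 : first.drop (i + 1) = [] := List.drop_eq_nil_of_le (by omega)
              rw [hd1, interMerge_nil_nil]; rfl
            · simp only [partyFuel, if_pos hcnt, dif_pos hi', if_neg hmem, if_neg hbrk,
                dif_neg hj', if_neg hend]
              have ihkey := ih (lst ++ [first[i]]) (i + 1) j (by omega) hj (by omega)
              have e : (((lst ++ [first[i]]).length : Nat) : Int) = (lst.length : Int) + 1 := by
                simp
              rw [e] at ihkey
              rw [ihkey, hdj]
    · -- first list is exhausted
      have hdi : first.drop i = [] := List.drop_eq_nil_of_le (by omega)
      rw [hdi, interMerge_nil_left]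
      by_cases hj' : j < second.length
      · have hdj : second.drop j = second[j] :: second.drop (j + 1) :=
          List.drop_eq_getElem_cons hj'
        by_cases hmem2 : lst.contains second[j] = true
        · rw [hdj, scanDedup_seen _ hcap hmem2]
          by_cases hend : i = first.length ∧ j + 1 = second.length
          · simp only [partyFuel, if_pos hcnt, dif_neg hi', if_neg hne,
              dif_pos hj', if_pos hmem2, if_pos hend]
            have hd2 : second.drop (j + 1) = [] := List.drop_eq_nil_of_le (by omega)
            rw [hd2]; rfl
          · simp only [partyFuel, if_pos hcnt, dif_neg hi', if_neg hne,
              dif_pos hj', if_pos hmem2, if_neg hend]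
            have ihkey := ih lst i (j + 1) hi (by omega) (by omega)
            rw [ihkey, hdi, interMerge_nil_left]
        · rw [hdj, scanDedup_new _ hcap hmem2]
          by_cases hend : i = first.length ∧ j + 1 = second.length
          · simp only [partyFuel, if_pos hcnt, dif_neg hi', if_neg hne,
              dif_pos hj', if_neg hmem2, if_pos hend]
            have hd2 : second.drop (j + 1) = [] := List.drop_eq_nil_of_le (by omega)
            rw [hd2]; rfl
          · simp only [partyFuel, if_pos hcnt, dif_neg hi', if_neg hne,
              dif_pos hj', if_neg hmem2, if_neg hend]
            have ihkey := ih (lst ++ [second[j]]) i (j + 1) hi (by omega) (by omega)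
            have e : (((lst ++ [second[j]]).length : Nat) : Int) = (lst.length : Int) + 1 := by
              simp
            rw [e] at ihkey
            rw [ihkey, hdi, interMerge_nil_left]
      · -- both lists are exhausted: A breaks, the remaining interleaving is empty
        have hdj : second.drop j = [] := List.drop_eq_nil_of_le (by omega)
        have hend : i = first.length ∧ j = second.length := ⟨by omega, by omega⟩
        rw [hdj]
        simp only [partyFuel, if_pos hcnt, dif_neg hi', if_neg hne, dif_neg hj',
          if_pos hend]
        rfl

-- ===== VERDICT (by name: the statement is the Claim_ definition above) =====
theorem party_spec : Claim_equal_party := by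
  intro first second maximum _
  show party first second maximum = party_alt first second maximum
  unfold party party_alt
  have h := partyFuel_eq first second maximum (first.length + second.length + 1)
    [] 0 0 (by omega) (by omega) (by omega)
  simpa using h
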